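-- pv_equiv track=rewrite | github.com/seokkyeong0/Algorithm_Practice | 백준/Bronze/2775. 부녀회장이 될테야/부녀회장이 될테야.py | vill_num
-- ===== SOURCE A (Python) =====
-- def vill_num(k, n):
--     memo = [0] * ((k*n)+n)
--     for i in range(1,n+1):
--         memo[i-1] = i
--     for a in range(k):
--         for b in range(n):
--             for c in range(b+1):
--                 memo[(a+1)*n+b] += memo[(a*n)+c]
--     return memo[-1]
-- ===== SOURCE B (Python) =====
-- def vill_num(k, n):
--     floor = list(range(1, n + 1))
--     for _ in range(k):
--         s = 0
--         for i in range(len(floor)):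
--             s += floor[i]
--             floor[i] = s
--     return floor[-1]
-- ===== Notes on version B (the rewrite author's own statement) =====
-- stated objective: faster
-- what changed: B replaces A's flat (k+1)*n memo array and its innermost re-summing loop (for c in range(b+1)) by one in-place running prefix-sum pass per floor, turning O(k*n^2) work into O(k*n).
-- outside the precondition, e.g. on vill_num(-8801, -1): A returns 0, B raises IndexError
import Mathlib
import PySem

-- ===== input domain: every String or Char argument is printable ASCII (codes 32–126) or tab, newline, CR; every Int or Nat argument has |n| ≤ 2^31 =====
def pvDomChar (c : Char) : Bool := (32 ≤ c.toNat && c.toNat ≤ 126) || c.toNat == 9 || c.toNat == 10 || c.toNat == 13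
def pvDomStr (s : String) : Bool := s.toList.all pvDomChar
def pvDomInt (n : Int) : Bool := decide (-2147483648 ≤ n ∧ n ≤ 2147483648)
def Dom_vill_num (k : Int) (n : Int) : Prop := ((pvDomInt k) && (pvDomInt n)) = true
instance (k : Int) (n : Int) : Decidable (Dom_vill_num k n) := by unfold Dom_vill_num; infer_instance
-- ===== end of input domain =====

-- B replaces A's O(k*n^2) triple loop (re-summing memo[a*n..a*n+c] for every room) by a
-- running prefix sum per floor, O(k*n); return value only, no observable mutation.

-- ===== PORT A =====
-- Python-exact array indexing (same index rule as PySem.List.pyGetD/pySetD, O(1) on Array):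
def pyArrGetD (xs : Array Int) (i : Int) (d : Int) : Int :=
  match PySem.List.pyIdx? xs.size i with
  | some j => xs[j]?.getD d
  | none => d

def pyArrSetD (xs : Array Int) (i : Int) (v : Int) : Array Int :=
  match PySem.List.pyIdx? xs.size i with
  | some j => xs.setIfInBounds j v
  | none => xs

def vill_num (k : Int) (n : Int) : Int :=
  let memo : Array Int := Array.replicate ((k*n)+n).toNat 0
  let memo := (PySem.List.pyRange 1 (n+1) 1).foldl
    (fun m i => pyArrSetD m (i-1) i) memo
  let memo := (PySem.List.pyRange 0 k 1).foldl (fun m a =>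
    (PySem.List.pyRange 0 n 1).foldl (fun m b =>
      (PySem.List.pyRange 0 (b+1) 1).foldl (fun m c =>
        pyArrSetD m ((a+1)*n+b)
          (pyArrGetD m ((a+1)*n+b) 0 + pyArrGetD m ((a*n)+c) 0)) m) m) memo
  pyArrGetD memo (-1) 0

-- ===== PORT B =====
def vill_num_alt (k : Int) (n : Int) : Int :=
  let floor : Array Int := (PySem.List.pyRange 1 (n+1) 1).toArray
  let floor := (PySem.List.pyRange 0 k 1).foldl (fun fl _ =>
    ((PySem.List.pyRange 0 (fl.size : Int) 1).foldl
      (fun (st : Int × Array Int) i =>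
        let s := st.1 + pyArrGetD st.2 i 0
        (s, pyArrSetD st.2 i s)) ((0:Int), fl)).2) floor
  pyArrGetD floor (-1) 0

-- ===== PRECONDITION & SPEC =====
-- Pre_ restricts to the natural domain (k floors >= 0, n rooms >= 1): outside it A raises
-- IndexError, except on corners with k < 0 and n < 0 where the memo length (k+1)*n happens to be
-- positive and A returns a leftover 0 — a value B's algorithm has no counterpart for (B raises).
def Pre_vill_num (k : Int) (n : Int) : Prop := 0 ≤ k ∧ 1 ≤ n
instance (k : Int) (n : Int) : Decidable (Pre_vill_num k n) := by unfold Pre_vill_num; infer_instance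
def pvWitness_vill_num : Int × Int := (2, 3)

def Spec_vill_num (k : Int) (n : Int) (out : Int) : Prop := out = vill_num_alt k n
instance (k : Int) (n : Int) (out : Int) : Decidable (Spec_vill_num k n out) := by unfold Spec_vill_num; infer_instance

-- ===== CLAIM (what is proved, stated in full; the proofs are below) =====
def Claim_equal_vill_num : Prop := ∀ (k : Int) (n : Int), Dom_vill_num k n → Pre_vill_num k n → Spec_vill_num k n (vill_num k n)

-- ===== LEMMAS AND PROOFS =====

-- simulate an Array-state fold by a List-state fold through an abstraction map
theorem foldl_sim {σ τ β : Type} (φ : σ → τ) (f : σ → β → σ) (g : τ → β → τ) (l : List β)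
    (h : ∀ s x, φ (f s x) = g (φ s) x) (init : σ) :
    φ (l.foldl f init) = l.foldl g (φ init) := by
  induction l generalizing init with
  | nil => rfl
  | cons x l ih => rw [List.foldl_cons, List.foldl_cons, ih, h]

theorem arrGetD_toList (xs : Array Int) (i d : Int) :
    pyArrGetD xs i d = PySem.List.pyGetD xs.toList i d := by
  unfold pyArrGetD PySem.List.pyGetD PySem.List.pyGet?
  rw [Array.length_toList]
  cases h : PySem.List.pyIdx? xs.size i <;> simp [Array.getElem?_toList]

theorem toList_arrSetD (xs : Array Int) (i v : Int) :
    (pyArrSetD xs i v).toList = PySem.List.pySetD xs.toList i v := by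
  unfold pyArrSetD PySem.List.pySetD PySem.List.pySet?
  rw [Array.length_toList]
  cases h : PySem.List.pyIdx? xs.size i <;> simp [Array.toList_setIfInBounds]

-- prefix sums of one floor, in closed form (proof-side abstraction of B's inner loop)
def prefSums (xs : List Int) : List Int :=
  (List.range xs.length).map (fun b => (xs.take (b+1)).sum)

-- the mathematical ladder both programs climb: floor 0 is 1..N, each next floor the prefix sums
def row (N : Nat) : Nat → List Int
  | 0 => (List.range N).map (fun b : Nat => ((b:Int)+1))
  | a+1 => prefSums (row N a)

-- A's memo after outer iteration a: floors 0..a laid out contiguously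
def rowsCat (N : Nat) : Nat → List Int
  | 0 => row N 0
  | a+1 => rowsCat N a ++ row N (a+1)

theorem length_prefSums (xs : List Int) : (prefSums xs).length = xs.length := by
  simp [prefSums]

theorem length_row (N a : Nat) : (row N a).length = N := by
  induction a with
  | zero => simp [row]
  | succ a ih => simp [row, length_prefSums, ih]

theorem row_getD_succ (N a b : Nat) (hb : b < N) :
    (row N (a+1)).getD b 0 = ((row N a).take (b+1)).sum := by
  rw [show row N (a+1) = prefSums (row N a) from rfl]
  unfold prefSums
  rw [length_row, List.getD_eq_getElem?_getD, List.getElem?_map]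
  simp [List.getElem?_range hb]

theorem sum_range_getD (xs : List Int) (t : Nat) (ht : t ≤ xs.length) :
    ((List.range t).map (fun c => xs.getD c 0)).sum = (xs.take t).sum := by
  induction t with
  | zero => simp
  | succ t ih =>
      have hgt := List.getElem?_eq_getElem (show t < xs.length by omega)
      have htake : List.take (t+1) xs = List.take t xs ++ [xs[t]] := by
        rw [List.take_succ, hgt]; rfl
      rw [List.range_succ, List.map_append, List.sum_append, ih (by omega), htake,
        List.sum_append]
      simp [List.getD_eq_getElem?_getD, hgt]
      rfl

theorem set_getD_self (xs : List Int) (i : Nat) (h : i < xs.length) :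
    xs.set i (xs.getD i 0) = xs := by
  rw [List.getD_eq_getElem?_getD]; simp [List.getElem?_eq_getElem h]

theorem getD_set_ne (xs : List Int) (w i : Nat) (v : Int) (h : i ≠ w) :
    (xs.set w v).getD i 0 = xs.getD i 0 := by
  simp [List.getD_eq_getElem?_getD, List.getElem?_set_ne (by omega : w ≠ i)]

theorem getD_set_self (xs : List Int) (w : Nat) (v : Int) (h : w < xs.length) :
    (xs.set w v).getD w 0 = v := by
  simp [List.getD_eq_getElem?_getD, h]

-- A's innermost c-loop: repeated += at a fixed write index w from read indices below w
theorem foldl_set_sum (cs : List Nat) : ∀ (m : List Int) (w : Nat) (idx : Nat → Nat),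
    w < m.length → (∀ c ∈ cs, idx c < w) →
    cs.foldl (fun m c => m.set w (m.getD w 0 + m.getD (idx c) 0)) m
      = m.set w (m.getD w 0 + (cs.map (fun c => m.getD (idx c) 0)).sum) := by
  induction cs with
  | nil =>
      intro m w idx hw _
      rw [List.foldl_nil, List.map_nil, List.sum_nil, add_zero, set_getD_self m w hw]
  | cons c cs ih =>
      intro m w idx hw hlt
      have hcw : idx c < w := hlt c (by simp)
      simp only [List.foldl_cons, List.map_cons, List.sum_cons]
      rw [ih _ w idx (by simpa using hw) (fun c' hc' => hlt c' (by simp [hc'])), List.set_set]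
      congr 1
      have hmap : cs.map (fun c' => (m.set w (m.getD w 0 + m.getD (idx c) 0)).getD (idx c') 0)
          = cs.map (fun c' => m.getD (idx c') 0) :=
        List.map_congr_left (fun c' hc' =>
          getD_set_ne _ _ _ _ (Nat.ne_of_lt (hlt c' (by simp [hc']))))
      rw [hmap, getD_set_self _ _ _ hw]
      ring

theorem rowsCat_length (N a : Nat) : (rowsCat N a).length = (a+1)*N := by
  induction a with
  | zero => simp [rowsCat, length_row]
  | succ a ih => simp [rowsCat, ih, length_row]; ring

theorem rowsCat_getD (N a : Nat) : ∀ i ≤ a, ∀ c < N,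
    (rowsCat N a).getD (i*N + c) 0 = (row N i).getD c 0 := by
  induction a with
  | zero =>
      intro i hi c hc
      interval_cases i
      show (row N 0).getD (0*N + c) 0 = (row N 0).getD c 0
      simp
  | succ a ih =>
      intro i hi c hc
      rw [show rowsCat N (a+1) = rowsCat N a ++ row N (a+1) from rfl,
        List.getD_eq_getElem?_getD]
      by_cases h : i ≤ a
      · rw [List.getElem?_append_left (by rw [rowsCat_length]; nlinarith)]
        rw [← List.getD_eq_getElem?_getD]
        exact ih i h c hc
      · have hieq : i = a + 1 := by omega
        subst hieq
        rw [List.getElem?_append_right (by rw [rowsCat_length]; nlinarith)]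
        rw [rowsCat_length, show (a+1)*N + c - (a+1)*N = c from by omega,
          ← List.getD_eq_getElem?_getD]

-- proof-side names for A's two inner loops (definitionally the port's lambdas)
def cLoop (n a b : Int) (m : List Int) : List Int :=
  (PySem.List.pyRange 0 (b+1) 1).foldl (fun m c =>
    PySem.List.pySetD m ((a+1)*n+b)
      (PySem.List.pyGetD m ((a+1)*n+b) 0 + PySem.List.pyGetD m ((a*n)+c) 0)) m

def bLoop (n a : Int) (m : List Int) : List Int :=
  (PySem.List.pyRange 0 n 1).foldl (fun m b => cLoop n a b m) m

theorem vill_num_eq (k n : Int) :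
    vill_num k n = PySem.List.pyGetD
      ((PySem.List.pyRange 0 k 1).foldl (fun m a => bLoop n a m)
        ((PySem.List.pyRange 1 (n+1) 1).foldl (fun m i => PySem.List.pySetD m (i-1) i)
          (List.replicate ((k*n)+n).toNat 0))) (-1) 0 := by
  unfold vill_num
  rw [arrGetD_toList]
  congr 1
  have hc : ∀ (a b : Int) (m : Array Int),
      ((PySem.List.pyRange 0 (b+1) 1).foldl (fun m c =>
        pyArrSetD m ((a+1)*n+b)
          (pyArrGetD m ((a+1)*n+b) 0 + pyArrGetD m ((a*n)+c) 0)) m).toList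
      = cLoop n a b m.toList := fun a b m =>
    foldl_sim Array.toList _ _ _
      (fun m c => by rw [toList_arrSetD, arrGetD_toList, arrGetD_toList]) m
  have hb : ∀ (a : Int) (m : Array Int),
      ((PySem.List.pyRange 0 n 1).foldl (fun m b =>
        (PySem.List.pyRange 0 (b+1) 1).foldl (fun m c =>
          pyArrSetD m ((a+1)*n+b)
            (pyArrGetD m ((a+1)*n+b) 0 + pyArrGetD m ((a*n)+c) 0)) m) m).toList
      = bLoop n a m.toList := fun a m =>
    foldl_sim Array.toList _ _ _ (fun m b => hc a b m) m
  have hinit :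
      ((PySem.List.pyRange 1 (n+1) 1).foldl (fun m i => pyArrSetD m (i-1) i)
        (Array.replicate ((k*n)+n).toNat 0)).toList
      = (PySem.List.pyRange 1 (n+1) 1).foldl (fun m i => PySem.List.pySetD m (i-1) i)
        (List.replicate ((k*n)+n).toNat 0) := by
    rw [foldl_sim Array.toList _ (fun (m : List Int) (i : Int) => PySem.List.pySetD m (i-1) i) _
      (fun m i => toList_arrSetD m (i-1) i) _, Array.toList_replicate]
  rw [foldl_sim Array.toList _ (fun m a => bLoop n a m) _ (fun m a => hb a m) _, hinit]

theorem cLoop_eq (N a b : Nat) (m : List Int) (hb : b < N) (hw : (a+1)*N + b < m.length) :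
    cLoop (N:Int) (a:Int) (b:Int) m
      = m.set ((a+1)*N+b)
          (m.getD ((a+1)*N+b) 0 + ((List.range (b+1)).map (fun c => m.getD (a*N+c) 0)).sum) := by
  unfold cLoop
  rw [show ((b:Int)+1) = (((b+1:Nat)):Int) from by push_cast; ring, PySem.List.pyRange_zero,
    Int.toNat_natCast, List.foldl_map]
  have hcongr : ∀ (acc : List Int), ∀ c ∈ List.range (b+1),
      (fun (m : List Int) (c : Nat) => PySem.List.pySetD m (((a:Int)+1)*(N:Int)+(b:Int))
        (PySem.List.pyGetD m (((a:Int)+1)*(N:Int)+(b:Int)) 0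
          + PySem.List.pyGetD m (((a:Int))*(N:Int)+(c:Int)) 0)) acc c
      = (fun (m : List Int) (c : Nat) => m.set ((a+1)*N+b)
          (m.getD ((a+1)*N+b) 0 + m.getD (a*N+c) 0)) acc c := by
    intro acc c _
    simp only []
    rw [show ((a:Int)+1)*(N:Int)+(b:Int) = (((a+1)*N+b : Nat) : Int) from by push_cast; ring,
      show ((a:Int))*(N:Int)+(c:Int) = ((a*N+c : Nat) : Int) from by push_cast; ring,
      PySem.List.pySetD_natCast, PySem.List.pyGetD_natCast, PySem.List.pyGetD_natCast]
  rw [PySem.List.foldl_congr_mem _ _ _ _ hcongr]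
  exact foldl_set_sum (List.range (b+1)) m ((a+1)*N+b) (fun c => a*N+c) hw
    (fun c hc => by
      have hc' : c < b+1 := List.mem_range.mp hc
      have h1 : a*N + c < a*N + N := Nat.add_lt_add_left (by omega) _
      have h2 : a*N + N ≤ (a+1)*N + b := by
        rw [show (a+1)*N = a*N + N from by ring]; exact Nat.le_add_right _ _
      exact lt_of_lt_of_le h1 h2)

theorem bLoop_eq (K N a : Nat) (ha : a < K) (hN : 1 ≤ N) :
    bLoop (N:Int) (a:Int) (rowsCat N a ++ List.replicate ((K-a)*N) 0)
      = rowsCat N (a+1) ++ List.replicate ((K-(a+1))*N) 0 := by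
  unfold bLoop
  rw [PySem.List.pyRange_zero, Int.toNat_natCast, List.foldl_map]
  have key : ∀ t ≤ N,
      (List.range t).foldl (fun m (b : Nat) => cLoop (N:Int) (a:Int) (b:Int) m)
        (rowsCat N a ++ List.replicate ((K-a)*N) 0)
      = rowsCat N a ++ (row N (a+1)).take t ++ List.replicate ((K-a)*N - t) 0 := by
    intro t
    induction t with
    | zero => intro _; simp
    | succ t ih =>
        intro ht
        have ht' : t < N := by omega
        have htKN : t < (K-a)*N := by
          calc t < N := ht'
          _ ≤ (K-a)*N := Nat.le_mul_of_pos_left N (by omega)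
        rw [List.range_succ, List.foldl_append, List.foldl_cons, List.foldl_nil, ih (by omega)]
        set M := rowsCat N a ++ (row N (a+1)).take t ++ List.replicate ((K-a)*N - t) 0 with hM
        have hlenRC : (rowsCat N a).length = (a+1)*N := rowsCat_length N a
        have hlenTake : ((row N (a+1)).take t).length = t := by
          rw [List.length_take, length_row]; omega
        have hlenM : M.length = (a+1)*N + ((K-a)*N) := by
          simp [hM, hlenRC, hlenTake]; omega
        rw [cLoop_eq N a t M ht' (by omega)]
        -- value read at the write position is 0
        have hw0 : M.getD ((a+1)*N + t) 0 = 0 := by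
          rw [hM, List.getD_eq_getElem?_getD, List.append_assoc,
            List.getElem?_append_right (by omega),
            List.getElem?_append_right (by rw [hlenTake]; omega)]
          simp [hlenRC, hlenTake, List.getElem?_replicate, htKN]
        -- reads all land in rowsCat N a
        have hreads : ∀ c ∈ List.range (t+1), M.getD (a*N+c) 0 = (row N a).getD c 0 := by
          intro c hc
          have hc' : c < t+1 := List.mem_range.mp hc
          have : a*N + c < (a+1)*N := by nlinarith
          rw [hM, List.getD_eq_getElem?_getD, List.append_assoc,
            List.getElem?_append_left (by omega), ← List.getD_eq_getElem?_getD]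
          exact rowsCat_getD N a a (le_refl a) c (by omega)
        have hsum : ((List.range (t+1)).map (fun c => M.getD (a*N+c) 0)).sum
            = (row N (a+1)).getD t 0 := by
          rw [List.map_congr_left hreads, sum_range_getD _ _ (by rw [length_row]; omega),
            row_getD_succ N a t ht']
        rw [hw0, hsum, zero_add]
        -- perform the set structurally
        rw [hM, List.append_assoc, List.set_append, if_neg (by omega), hlenRC,
          show (a+1)*N + t - (a+1)*N = t from by omega,
          List.set_append, if_neg (by rw [hlenTake]; omega), hlenTake, Nat.sub_self,
          show List.replicate ((K-a)*N - t) (0:Int) = 0 :: List.replicate ((K-a)*N - (t+1)) 0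
            from by rw [show (K-a)*N - t = ((K-a)*N - (t+1)) + 1 from by omega, List.replicate_succ],
          List.set_cons_zero]
        rw [show (row N (a+1)).take (t+1) = (row N (a+1)).take t ++ [(row N (a+1)).getD t 0]
            from by
              rw [List.take_succ, List.getD_eq_getElem?_getD,
                List.getElem?_eq_getElem (by rw [length_row]; omega)]
              simp]
        simp [List.append_assoc]
  have last := key N (le_refl N)
  rw [last, List.take_of_length_le (by rw [length_row])]
  rw [show rowsCat N a ++ row N (a+1) = rowsCat N (a+1) from rfl,
    show (K-a)*N - N = (K-(a+1))*N from by
      rcases Nat.exists_eq_add_of_lt ha with ⟨d, hd⟩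
      subst hd
      rw [show a+d+1-a = d+1 from by omega, show a+d+1-(a+1) = d from by omega, Nat.succ_mul]
      exact Nat.add_sub_cancel _ _]

theorem initLoop (N M : Nat) (hNM : N ≤ M) : ∀ t ≤ N,
    (PySem.List.pyRange 1 ((t:Int)+1) 1).foldl (fun m i => PySem.List.pySetD m (i-1) i)
        (List.replicate M (0:Int))
      = (List.range t).map (fun b : Nat => ((b:Int)+1)) ++ List.replicate (M - t) (0:Int) := by
  intro t
  induction t with
  | zero =>
      intro _
      rw [PySem.List.pyRange_one_eq_nil (by norm_num)]
      simp
  | succ t ih =>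
      intro ht
      rw [show ((t+1:Nat):Int)+1 = ((t:Int)+1)+1 from by push_cast; ring,
        PySem.List.pyRange_one_succ_right (by omega : (1:Int) ≤ (t:Int)+1), List.foldl_append,
        List.foldl_cons, List.foldl_nil, ih (by omega)]
      rw [show ((t:Int)+1)-1 = ((t:Nat):Int) from by ring, PySem.List.pySetD_natCast,
        List.set_append, if_neg (by simp),
        show List.replicate (M-t) (0:Int) = 0 :: List.replicate (M-(t+1)) 0
          from by rw [show M - t = (M - (t+1)) + 1 from by omega, List.replicate_succ]]
      simp [List.range_succ]

theorem foldl_const_iterate {α β : Type} (g : α → α) (l : List β) (x : α) :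
    l.foldl (fun f _ => g f) x = g^[l.length] x := by
  induction l generalizing x with
  | nil => simp
  | cons y l ih => simp [ih, Function.iterate_succ_apply]

theorem row_iterate (N a : Nat) :
    prefSums^[a] ((List.range N).map (fun b : Nat => ((b:Int)+1))) = row N a := by
  induction a with
  | zero => simp [row]
  | succ a ih => rw [Function.iterate_succ_apply', ih]; rfl

theorem outerLoop (K N : Nat) (hN : 1 ≤ N) : ∀ t ≤ K,
    (List.range t).foldl (fun m (a : Nat) => bLoop (N:Int) ((a:Nat):Int) m)
        (rowsCat N 0 ++ List.replicate (K*N) 0)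
      = rowsCat N t ++ List.replicate ((K-t)*N) 0 := by
  intro t
  induction t with
  | zero => intro _; simp
  | succ t ih =>
      intro ht
      rw [List.range_succ, List.foldl_append, List.foldl_cons, List.foldl_nil, ih (by omega)]
      exact bLoop_eq K N t (by omega) hN

theorem row_nonempty (N a : Nat) (hN : 1 ≤ N) : row N a ≠ [] := by
  intro h
  have := length_row N a
  rw [h] at this
  simp at this
  omega

theorem getLast_eq_getD (xs : List Int) (h : xs ≠ []) (i : Nat) (hi : i = xs.length - 1) :
    xs.getLast h = xs.getD i 0 := by
  have hlt : xs.length - 1 < xs.length := by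
    have := List.length_pos_of_ne_nil h; omega
  subst hi
  rw [List.getLast_eq_getElem, List.getD_eq_getElem?_getD, List.getElem?_eq_getElem hlt]
  rfl

theorem A_nat (K N : Nat) (hN : 1 ≤ N) :
    vill_num (K:Int) (N:Int) = (row N K).getD (N-1) 0 := by
  rw [vill_num_eq]
  rw [show (K:Int)*(N:Int)+(N:Int) = ((K*N+N : Nat):Int) from by push_cast; ring,
    Int.toNat_natCast,
    initLoop N (K*N+N) (by omega) N (le_refl N),
    show K*N+N-N = K*N from by omega,
    PySem.List.pyRange_zero, Int.toNat_natCast, List.foldl_map]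
  rw [show (List.range N).map (fun b : Nat => ((b:Int)+1)) = rowsCat N 0 from rfl,
    outerLoop K N hN K (le_refl K), Nat.sub_self, Nat.zero_mul, List.replicate_zero,
    List.append_nil]
  have hne : rowsCat N K ≠ [] := by
    intro h
    have := rowsCat_length N K
    rw [h] at this
    simp at this
    omega
  have hlen : (rowsCat N K).length = K*N + N := by rw [rowsCat_length, Nat.succ_mul]
  rw [PySem.List.pyGetD_neg_one _ _ hne,
    getLast_eq_getD _ hne (K*N + (N-1)) (by rw [hlen, Nat.add_sub_assoc hN])]
  exact rowsCat_getD N K K (le_refl K) (N-1) (by omega)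

theorem inner_pref (l : List Int) :
    ((PySem.List.pyRange 0 (l.length : Int) 1).foldl
      (fun (st : Int × List Int) i =>
        (st.1 + PySem.List.pyGetD st.2 i 0,
         PySem.List.pySetD st.2 i (st.1 + PySem.List.pyGetD st.2 i 0))) ((0:Int), l)).2
      = prefSums l := by
  rw [PySem.List.pyRange_zero, Int.toNat_natCast, List.foldl_map]
  have hplen : (prefSums l).length = l.length := length_prefSums l
  have key : ∀ t ≤ l.length,
      (List.range t).foldl
        (fun (st : Int × List Int) (i : Nat) =>
          (st.1 + PySem.List.pyGetD st.2 (i:Int) 0,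
           PySem.List.pySetD st.2 (i:Int) (st.1 + PySem.List.pyGetD st.2 (i:Int) 0)))
        ((0:Int), l)
      = ((l.take t).sum, (prefSums l).take t ++ l.drop t) := by
    intro t
    induction t with
    | zero => intro _; simp
    | succ t ih =>
        intro ht
        have ht' : t < l.length := by omega
        rw [List.range_succ, List.foldl_append, List.foldl_cons, List.foldl_nil, ih (by omega)]
        have htakelen : ((prefSums l).take t).length = t := by
          rw [List.length_take, hplen]; omega
        have hget : PySem.List.pyGetD ((prefSums l).take t ++ l.drop t) (t:Int) 0 = l[t] := by
          rw [PySem.List.pyGetD_natCast, List.getD_eq_getElem?_getD,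
            List.getElem?_append_right (by omega), htakelen, Nat.sub_self,
            List.drop_eq_getElem_cons ht']
          rfl
        have hs : (l.take t).sum + l[t] = (l.take (t+1)).sum := by
          rw [List.take_succ, List.getElem?_eq_getElem ht', List.sum_append]
          simp
        have hset : PySem.List.pySetD ((prefSums l).take t ++ l.drop t) (t:Int)
              ((l.take (t+1)).sum)
            = (prefSums l).take (t+1) ++ l.drop (t+1) := by
          rw [PySem.List.pySetD_natCast, List.set_append, if_neg (by omega), htakelen,
            Nat.sub_self, List.drop_eq_getElem_cons ht', List.set_cons_zero]
          rw [show (prefSums l).take (t+1) = (prefSums l).take t ++ [(l.take (t+1)).sum] from by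
            rw [List.take_succ, List.getElem?_eq_getElem (by omega)]
            unfold prefSums
            simp [List.getElem_map, List.getElem_range]]
          simp
        rw [hget, hs, hset]
  have last := key l.length (le_refl _)
  rw [last]
  simp [List.take_of_length_le (le_of_eq hplen)]

theorem alt_nat (K N : Nat) (hN : 1 ≤ N) :
    vill_num_alt (K:Int) (N:Int) = (row N K).getD (N-1) 0 := by
  have hfloor : PySem.List.pyRange 1 ((N:Int)+1) 1
      = (List.range N).map (fun b : Nat => ((b:Int)+1)) := by
    rw [PySem.List.pyRange_one]
    rw [show (((N:Int)+1) - 1).toNat = N from by omega]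
    exact List.map_congr_left (fun b _ => add_comm 1 (b:Int))
  unfold vill_num_alt
  rw [arrGetD_toList]
  have hstep : ∀ (fl : Array Int) (x : Int),
      (((PySem.List.pyRange 0 (fl.size : Int) 1).foldl
        (fun (st : Int × Array Int) i =>
          let s := st.1 + pyArrGetD st.2 i 0
          (s, pyArrSetD st.2 i s)) ((0:Int), fl)).2).toList
      = prefSums fl.toList := by
    intro fl _
    have hsim := foldl_sim (fun st : Int × Array Int => (st.1, st.2.toList))
      (fun (st : Int × Array Int) i =>
        let s := st.1 + pyArrGetD st.2 i 0
        (s, pyArrSetD st.2 i s))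
      (fun (st : Int × List Int) i =>
        (st.1 + PySem.List.pyGetD st.2 i 0,
         PySem.List.pySetD st.2 i (st.1 + PySem.List.pyGetD st.2 i 0)))
      (PySem.List.pyRange 0 (fl.size : Int) 1)
      (fun st i => by simp [arrGetD_toList, toList_arrSetD]) ((0:Int), fl)
    have h2 := congrArg Prod.snd hsim
    simp only [] at h2
    rw [h2, show (fl.size : Int) = (fl.toList.length : Int) from by rw [Array.length_toList],
      inner_pref]
  rw [foldl_sim Array.toList _ (fun l _ => prefSums l) _ hstep _, List.toList_toArray,
    foldl_const_iterate, PySem.List.length_pyRange_one,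
    show ((K:Int) - 0).toNat = K from by omega, hfloor, row_iterate]
  have hne : row N K ≠ [] := row_nonempty N K hN
  rw [PySem.List.pyGetD_neg_one _ _ hne,
    getLast_eq_getD _ hne (N-1) (by rw [length_row])]

-- ===== VERDICT (by name: the statement is the Claim_ definition above) =====
theorem vill_num_spec : Claim_equal_vill_num := by
  intro k n _ hpre
  obtain ⟨hk, hn⟩ := hpre
  unfold Spec_vill_num
  obtain ⟨K, hK⟩ : ∃ K : Nat, k = (K:Int) := ⟨k.toNat, (Int.toNat_of_nonneg hk).symm⟩
  obtain ⟨N, hNe⟩ : ∃ N : Nat, n = (N:Int) := ⟨n.toNat, (Int.toNat_of_nonneg (by omega)).symm⟩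
  have hN : 1 ≤ N := by omega
  rw [hK, hNe, A_nat K N hN, alt_nat K N hN]
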